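-- pv_equiv track=rewrite | github.com/OpenBMB/BMInf | bminf/scheduler/__init__.py | calc_fixed_layers
-- ===== SOURCE A (Python) =====
-- def calc_fixed_layers(total_layers : int, max_fixed : int):
--     max_fixed = min(max_fixed, total_layers)
--     scheduled_layers = total_layers - max_fixed
--     vals = [(i + 1) * scheduled_layers // total_layers for i in range(total_layers)]
--     ret = []
--     last_v = 0
--     for i, v in enumerate(vals):
--         if v == last_v:
--             ret.append(i)
--         else:
--             last_v = v
--     return ret
-- ===== SOURCE B (Python) =====
-- def calc_fixed_layers(total_layers: int, max_fixed: int):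
--     scheduled_layers = total_layers - min(max_fixed, total_layers)
--     if scheduled_layers >= total_layers:
--         # no layer stays fixed: every position is a scheduled tick
--         return []
--     # positions of the scheduled_layers "offloaded" ticks, computed directly via ceiling
--     scheduled = {-(-j * total_layers // scheduled_layers) - 1
--                  for j in range(1, scheduled_layers + 1)}
--     return [i for i in range(total_layers) if i not in scheduled]
-- ===== Notes on version B (the rewrite author's own statement) =====
-- stated objective: alternative
-- what changed: Instead of a single stateful pass tracking the last floor value, B computes the S scheduled tick positions directly with a ceiling formula into a set and returns the complement of that set over range(total_layers).
import Mathlib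
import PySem

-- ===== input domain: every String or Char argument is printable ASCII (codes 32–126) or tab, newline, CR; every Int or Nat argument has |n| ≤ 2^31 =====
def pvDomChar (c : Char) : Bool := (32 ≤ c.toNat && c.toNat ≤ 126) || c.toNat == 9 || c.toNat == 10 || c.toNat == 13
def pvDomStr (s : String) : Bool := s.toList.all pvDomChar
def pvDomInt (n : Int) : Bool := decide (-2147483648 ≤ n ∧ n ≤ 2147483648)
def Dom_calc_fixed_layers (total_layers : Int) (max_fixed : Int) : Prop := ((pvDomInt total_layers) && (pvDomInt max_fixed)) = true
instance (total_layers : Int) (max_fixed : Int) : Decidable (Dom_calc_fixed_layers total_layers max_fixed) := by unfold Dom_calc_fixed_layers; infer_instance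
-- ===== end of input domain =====

-- B computes the scheduled tick positions directly by a ceiling formula into a set and
-- returns the complement, instead of A's stateful floor-tracking pass (alternative decomposition).

-- ===== PORT A =====
def calc_fixed_layers (total_layers : Int) (max_fixed : Int) : List Int :=
  let max_fixed := min max_fixed total_layers
  let scheduled_layers := total_layers - max_fixed
  let vals := (PySem.List.pyRange 0 total_layers 1).map
      (fun i => PySem.Int.floordiv ((i + 1) * scheduled_layers) total_layers)
  let r := (PySem.List.enumerate vals).foldl
      (fun (st : List Int × Int) iv =>
        if iv.2 = st.2 then (st.1 ++ [iv.1], st.2) else (st.1, iv.2))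
      ([], 0)
  r.1

-- ===== PORT B =====
def calc_fixed_layers_alt (total_layers : Int) (max_fixed : Int) : List Int :=
  let scheduled_layers := total_layers - min max_fixed total_layers
  if scheduled_layers ≥ total_layers then []
  else
  let scheduled : PySem.Set Int := PySem.Set.ofList
      ((PySem.List.pyRange 1 (scheduled_layers + 1) 1).map
        (fun j => -(PySem.Int.floordiv (-(j * total_layers)) scheduled_layers) - 1))
  (PySem.List.pyRange 0 total_layers 1).filter
      (fun i => !(PySem.Set.contains scheduled i))

-- ===== PRECONDITION & SPEC =====
def Spec_calc_fixed_layers (total_layers : Int) (max_fixed : Int) (out : List Int) : Prop := out = calc_fixed_layers_alt total_layers max_fixed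
instance (total_layers : Int) (max_fixed : Int) (out : List Int) : Decidable (Spec_calc_fixed_layers total_layers max_fixed out) := by unfold Spec_calc_fixed_layers; infer_instance

-- ===== CLAIM (what is proved, stated in full; the proofs are below) =====
def Claim_equal_calc_fixed_layers : Prop := ∀ (total_layers : Int) (max_fixed : Int), Dom_calc_fixed_layers total_layers max_fixed → Spec_calc_fixed_layers total_layers max_fixed (calc_fixed_layers total_layers max_fixed)

-- ===== LEMMAS AND PROOFS =====

-- common characterization: keep i iff the floor value does not change at i
def pvKeep (T S i : Int) : Bool := PySem.Int.floordiv ((i + 1) * S) T == PySem.Int.floordiv (i * S) T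

-- A-side invariant: the stateful pass computes (kept prefix, last floor value)
theorem pvFoldA (T S : Int) (n : Nat) :
    ((PySem.List.enumerate ((PySem.List.pyRange 0 (n : Int) 1).map
        (fun i => PySem.Int.floordiv ((i + 1) * S) T))).foldl
      (fun (st : List Int × Int) iv =>
        if iv.2 = st.2 then (st.1 ++ [iv.1], st.2) else (st.1, iv.2))
      ([], 0))
    = ((PySem.List.pyRange 0 (n : Int) 1).filter (pvKeep T S),
       PySem.Int.floordiv ((n : Int) * S) T) := by
  induction n with
  | zero =>
      simp [PySem.List.pyRange_one_eq_nil, PySem.Int.floordiv]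
  | succ n ih =>
      have h0 : (0 : Int) ≤ (n : Int) := by positivity
      have hr : PySem.List.pyRange 0 ((n : Int) + 1) 1
          = PySem.List.pyRange 0 (n : Int) 1 ++ [(n : Int)] :=
        PySem.List.pyRange_one_succ_right h0
      push_cast
      rw [hr, List.map_append, PySem.List.enumerate_append, List.foldl_append, ih]
      have hlen : ((PySem.List.pyRange 0 (n : Int) 1).map
          (fun i => PySem.Int.floordiv ((i + 1) * S) T)).length = n := by
        simp [PySem.List.length_pyRange_one]
      rw [hlen]
      simp only [List.map_cons, List.map_nil, PySem.List.enumerate_cons,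
        PySem.List.enumerate_nil, List.foldl_cons, List.foldl_nil, List.filter_append]
      by_cases h : PySem.Int.floordiv (((n : Int) + 1) * S) T
          = PySem.Int.floordiv ((n : Int) * S) T
      · simp [pvKeep, h]
      · simp [pvKeep, h]

-- floor value of 0 is 0
theorem pvFd_zero (T : Int) : PySem.Int.floordiv 0 T = 0 := by
  simp [PySem.Int.floordiv]

-- the arithmetic core: i (with 0 ≤ i < T) is a tick position iff the floor value changes at i
theorem pvTick_iff (T S i : Int) (hT : 0 < T) (hS : 0 ≤ S) (hi0 : 0 ≤ i) (hiT : i < T) :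
    (∃ j, (1 ≤ j ∧ j ≤ S) ∧ -(PySem.Int.floordiv (-(j * T)) S) - 1 = i)
      ↔ PySem.Int.floordiv ((i + 1) * S) T ≠ PySem.Int.floordiv (i * S) T := by
  set q1 := PySem.Int.floordiv (i * S) T with hq1
  set q2 := PySem.Int.floordiv ((i + 1) * S) T with hq2
  have h1 : q1 * T ≤ i * S ∧ i * S < (q1 + 1) * T :=
    (PySem.Int.floordiv_eq_iff_of_pos hT).mp hq1.symm
  have h2 : q2 * T ≤ (i + 1) * S ∧ (i + 1) * S < (q2 + 1) * T :=
    (PySem.Int.floordiv_eq_iff_of_pos hT).mp hq2.symm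
  have hq1nn : 0 ≤ q1 := by nlinarith [h1.1, h1.2]
  have hq12 : q1 ≤ q2 := by nlinarith [h1.1, h1.2, h2.1, h2.2]
  constructor
  · rintro ⟨j, ⟨hj1, hjS⟩, hjtick⟩
    have hSpos : 0 < S := by omega
    have hceil : -(PySem.Int.floordiv (-(j * T)) S) = i + 1 := by omega
    have hb : (i + 1 - 1) * S < j * T ∧ j * T ≤ (i + 1) * S :=
      (PySem.Int.neg_floordiv_neg_eq_iff_of_pos hSpos).mp hceil
    have hq1j : q1 < j := by nlinarith [h1.1, hb.1]
    have hjq2 : j ≤ q2 := by nlinarith [hb.2, h2.2]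
    omega
  · intro hne
    have hq1lt : q1 < q2 := lt_of_le_of_ne hq12 (Ne.symm hne)
    have hSpos : 0 < S := by
      rcases lt_or_eq_of_le hS with h | h
      · exact h
      · exfalso
        apply hne
        rw [hq1, hq2, ← h]
        simp [pvFd_zero]
    refine ⟨q1 + 1, ⟨by omega, ?_⟩, ?_⟩
    · -- q1 + 1 ≤ S since q2 ≤ S
      have : q2 ≤ S := by nlinarith [h2.1]
      omega
    · have : -(PySem.Int.floordiv (-((q1 + 1) * T)) S) = i + 1 := by
        rw [PySem.Int.neg_floordiv_neg_eq_iff_of_pos hSpos]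
        constructor
        · nlinarith [h1.2]
        · nlinarith [h2.1]
      omega

-- A's pass equals the filter characterization
theorem pvA_eq (T M : Int) :
    calc_fixed_layers T M
      = (PySem.List.pyRange 0 T 1).filter (pvKeep T (T - min M T)) := by
  show ((PySem.List.enumerate ((PySem.List.pyRange 0 T 1).map
        (fun i => PySem.Int.floordiv ((i + 1) * (T - min M T)) T))).foldl
      (fun (st : List Int × Int) iv =>
        if iv.2 = st.2 then (st.1 ++ [iv.1], st.2) else (st.1, iv.2))
      ([], 0)).1 = _
  by_cases hT : T ≤ 0
  · rw [PySem.List.pyRange_one_eq_nil hT]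
    simp [PySem.List.enumerate_nil]
  · rw [not_le] at hT
    have hn : ((T.toNat : Nat) : Int) = T := by omega
    rw [← hn, pvFoldA]

-- B's complement-of-ticks equals the filter characterization
theorem pvB_eq (T M : Int) :
    calc_fixed_layers_alt T M
      = (PySem.List.pyRange 0 T 1).filter (pvKeep T (T - min M T)) := by
  have hS : 0 ≤ T - min M T := by omega
  show (if T - min M T ≥ T then ([] : List Int)
    else (PySem.List.pyRange 0 T 1).filter
      (fun i => !(PySem.Set.contains (PySem.Set.ofList
        ((PySem.List.pyRange 1 ((T - min M T) + 1) 1).map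
          (fun j => -(PySem.Int.floordiv (-(j * T)) (T - min M T)) - 1))) i))) = _
  split_ifs with hge
  · -- nothing fixed: every index is a tick, the filter keeps nothing
    symm
    rw [List.filter_eq_nil_iff]
    intro i hi
    rw [PySem.List.mem_pyRange_one] at hi
    have hT : 0 < T := lt_of_le_of_lt hi.1 hi.2
    have h1 := (PySem.Int.floordiv_eq_iff_of_pos (a := i * (T - min M T)) hT).mp rfl
    have h2 := (PySem.Int.floordiv_eq_iff_of_pos (a := (i + 1) * (T - min M T)) hT).mp rfl
    simp only [pvKeep, Bool.not_eq_true, beq_eq_false_iff_ne, ne_eq]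
    intro heq
    nlinarith [h1.1, h1.2, h2.1, h2.2]
  refine List.filter_congr ?_
  intro i hi
  rw [PySem.List.mem_pyRange_one] at hi
  have hT : 0 < T := lt_of_le_of_lt hi.1 hi.2
  have hmem : (PySem.Set.contains (PySem.Set.ofList
      ((PySem.List.pyRange 1 ((T - min M T) + 1) 1).map
        (fun j => -(PySem.Int.floordiv (-(j * T)) (T - min M T)) - 1))) i) = true
      ↔ (∃ j, (1 ≤ j ∧ j ≤ T - min M T) ∧
          -(PySem.Int.floordiv (-(j * T)) (T - min M T)) - 1 = i) := by
    rw [PySem.Set.contains_iff, PySem.Set.mem_ofList, List.mem_map]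
    constructor
    · rintro ⟨j, hj, hji⟩
      rw [PySem.List.mem_pyRange_one] at hj
      exact ⟨j, ⟨hj.1, by omega⟩, hji⟩
    · rintro ⟨j, hj, hji⟩
      exact ⟨j, PySem.List.mem_pyRange_one.mpr ⟨hj.1, by omega⟩, hji⟩
    
  have hiff := pvTick_iff T (T - min M T) i hT hS hi.1 hi.2
  rw [← hmem] at hiff
  by_cases hc : PySem.Set.contains (PySem.Set.ofList
      ((PySem.List.pyRange 1 ((T - min M T) + 1) 1).map
        (fun j => -(PySem.Int.floordiv (-(j * T)) (T - min M T)) - 1))) i = true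
  · have hne := hiff.mp hc
    rw [PySem.Set.contains_iff] at hc
    simp [pvKeep, hc, hne]
  · have heq : PySem.Int.floordiv ((i + 1) * (T - min M T)) T
        = PySem.Int.floordiv (i * (T - min M T)) T := by
      by_contra hne
      exact hc (hiff.mpr hne)
    have hnm : i ∉ PySem.Set.ofList
        ((PySem.List.pyRange 1 ((T - min M T) + 1) 1).map
          (fun j => -(PySem.Int.floordiv (-(j * T)) (T - min M T)) - 1)) := by
      intro hmem'
      exact hc ((PySem.Set.contains_iff _ _).mpr hmem')
    simp [pvKeep, hnm, heq]

-- ===== VERDICT (by name: the statement is the Claim_ definition above) =====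
theorem calc_fixed_layers_spec : Claim_equal_calc_fixed_layers := by
  intro T M _dom
  unfold Spec_calc_fixed_layers
  rw [pvA_eq, pvB_eq]
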